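-- pv_equiv track=rewrite | github.com/MrBrantCode/unitest_baseline | mut_generate/mist_train_cf/cf_20534/solution.py | calculate_dna_weight
-- ===== SOURCE A (Python) =====
-- def calculate_dna_weight(sequence):
--     weights = {'A': 1, 'C': 2, 'G': 3, 'T': 4}
--     prev_nucleotide = None
--     weight = 0
--
--     for nucleotide in sequence.upper():
--         if nucleotide in weights:
--             if nucleotide == prev_nucleotide:
--                 weight += weights[nucleotide] * 2
--             else:
--                 weight += weights[nucleotide]
--             prev_nucleotide = nucleotide
--
--     return weight
-- ===== SOURCE B (Python) =====
-- def calculate_dna_weight(sequence):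
--     weights = {'A': 1, 'C': 2, 'G': 3, 'T': 4}
--     valid = [c for c in sequence.upper() if c in weights]
--     runs = []
--     for c in valid:
--         if runs and runs[-1][0] == c:
--             runs[-1][1] += 1
--         else:
--             runs.append([c, 1])
--     return sum(weights[c] * (2 * k - 1) for c, k in runs)
-- ===== Notes on version B (the rewrite author's own statement) =====
-- stated objective: alternative
-- what changed: B replaces A's stateful prev-nucleotide scan by a filter of valid nucleotides followed by run-length encoding, summing weight*(2k-1) per run of length k.
import Mathlib
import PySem

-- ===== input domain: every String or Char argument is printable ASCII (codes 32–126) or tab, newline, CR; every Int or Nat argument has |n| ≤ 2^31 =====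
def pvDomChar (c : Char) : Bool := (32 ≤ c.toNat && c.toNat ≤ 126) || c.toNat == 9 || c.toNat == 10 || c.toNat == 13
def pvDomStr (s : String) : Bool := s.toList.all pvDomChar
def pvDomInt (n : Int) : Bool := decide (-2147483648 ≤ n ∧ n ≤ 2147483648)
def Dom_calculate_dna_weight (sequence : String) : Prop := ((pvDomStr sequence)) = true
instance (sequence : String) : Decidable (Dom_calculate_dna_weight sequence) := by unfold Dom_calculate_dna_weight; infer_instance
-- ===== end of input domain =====

-- B replaces A's stateful prev-nucleotide scan by filter + run-length encoding (alternative decomposition, same cost).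

-- ===== PORT A =====
-- weights = {'A': 1, 'C': 2, 'G': 3, 'T': 4}
def pvWeights : PySem.Dict Char Int :=
  PySem.Dict.ofList [('A', 1), ('C', 2), ('G', 3), ('T', 4)]

-- one iteration of A's for-loop: state is (prev_nucleotide, weight)
def pvStepA (st : Option Char × Int) (c : Char) : Option Char × Int :=
  if pvWeights.contains c then
    if some c == st.1 then (some c, st.2 + pvWeights.getD c 0 * 2)
    else (some c, st.2 + pvWeights.getD c 0)
  else st

def calculate_dna_weight (sequence : String) : Int :=
  (((PySem.Str.upper sequence).toList.foldl pvStepA (none, 0)).2)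

-- ===== PORT B =====
-- one iteration of B's run-building loop (runs kept with the current run at the head)
def pvStepR (acc : List (Char × Int)) (c : Char) : List (Char × Int) :=
  match acc with
  | (d, k) :: t => if d == c then (d, k + 1) :: t else (c, 1) :: (d, k) :: t
  | [] => [(c, 1)]

def calculate_dna_weight_alt (sequence : String) : Int :=
  let valid := (PySem.Str.upper sequence).toList.filter (fun c => pvWeights.contains c)
  let runs := valid.foldl pvStepR []
  runs.reverse.foldl (fun s p => s + pvWeights.getD p.1 0 * (2 * p.2 - 1)) 0

-- ===== PRECONDITION & SPEC =====
def Spec_calculate_dna_weight (sequence : String) (out : Int) : Prop := out = calculate_dna_weight_alt sequence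
instance (sequence : String) (out : Int) : Decidable (Spec_calculate_dna_weight sequence out) := by unfold Spec_calculate_dna_weight; infer_instance

-- ===== CLAIM (what is proved, stated in full; the proofs are below) =====
def Claim_equal_calculate_dna_weight : Prop := ∀ (sequence : String), Dom_calculate_dna_weight sequence → Spec_calculate_dna_weight sequence (calculate_dna_weight sequence)

-- ===== LEMMAS AND PROOFS =====

-- A's step restricted to valid nucleotides (the guard removed)
def pvStepA' (st : Option Char × Int) (c : Char) : Option Char × Int :=
  if some c == st.1 then (some c, st.2 + pvWeights.getD c 0 * 2)
  else (some c, st.2 + pvWeights.getD c 0)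

-- value of one run
def pvRunVal (p : Char × Int) : Int := pvWeights.getD p.1 0 * (2 * p.2 - 1)

def pvSumRuns (acc : List (Char × Int)) : Int := (acc.map pvRunVal).sum

def pvPrevOf (acc : List (Char × Int)) : Option Char :=
  match acc with
  | [] => none
  | (d, _) :: _ => some d

lemma pvFoldA_filter (l : List Char) (st : Option Char × Int) :
    l.foldl pvStepA st = (l.filter (fun c => pvWeights.contains c)).foldl pvStepA' st := by
  induction l generalizing st with
  | nil => rfl
  | cons c t ih =>
    by_cases h : pvWeights.contains c = true
    · simp [h, pvStepA, pvStepA', ih]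
    · simp only [Bool.not_eq_true] at h
      simp [h, pvStepA, ih]

lemma pvFoldR_inv (l : List Char) (acc : List (Char × Int)) :
    (l.foldl pvStepA' (pvPrevOf acc, pvSumRuns acc)).2 = pvSumRuns (l.foldl pvStepR acc) := by
  induction l generalizing acc with
  | nil => rfl
  | cons c t ih =>
    simp only [List.foldl_cons]
    match acc with
    | [] =>
      have : pvStepA' (pvPrevOf ([] : List (Char × Int)), pvSumRuns []) c
          = (pvPrevOf (pvStepR [] c), pvSumRuns (pvStepR [] c)) := by
        simp [pvStepA', pvStepR, pvPrevOf, pvSumRuns, pvRunVal]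
      rw [this, ih]
    | (d, k) :: tl =>
      by_cases hdc : d = c
      · subst hdc
        have : pvStepA' (pvPrevOf ((d, k) :: tl), pvSumRuns ((d, k) :: tl)) d
            = (pvPrevOf (pvStepR ((d, k) :: tl) d), pvSumRuns (pvStepR ((d, k) :: tl) d)) := by
          simp [pvStepA', pvStepR, pvPrevOf, pvSumRuns, pvRunVal]
          ring
        rw [this, ih]
      · have hbeq : (d == c) = false := by simp [hdc]
        have : pvStepA' (pvPrevOf ((d, k) :: tl), pvSumRuns ((d, k) :: tl)) c
            = (pvPrevOf (pvStepR ((d, k) :: tl) c), pvSumRuns (pvStepR ((d, k) :: tl) c)) := by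
          simp [pvStepA', pvStepR, pvPrevOf, pvSumRuns, pvRunVal, hbeq, Ne.symm hdc]
          ring
        rw [this, ih]

lemma pvSumFoldl (l : List (Char × Int)) (s : Int) :
    l.foldl (fun s p => s + pvWeights.getD p.1 0 * (2 * p.2 - 1)) s = s + pvSumRuns l := by
  induction l generalizing s with
  | nil => simp [pvSumRuns]
  | cons p t ih => simp [pvSumRuns, pvRunVal, ih]; ring

-- ===== VERDICT (by name: the statement is the Claim_ definition above) =====
theorem calculate_dna_weight_spec : Claim_equal_calculate_dna_weight := by
  intro s _
  unfold Spec_calculate_dna_weight calculate_dna_weight calculate_dna_weight_alt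
  rw [pvFoldA_filter]
  have h0 : ((none : Option Char), (0 : Int)) = (pvPrevOf [], pvSumRuns []) := by
    simp [pvPrevOf, pvSumRuns]
  rw [h0, pvFoldR_inv, pvSumFoldl]
  simp [pvSumRuns, List.map_reverse]
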